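-- pv_equiv track=rewrite | github.com/horseinthesky/PyNEng | 7.Functions/task7.1b.py | generate_access_config
-- ===== SOURCE A (Python) =====
-- def generate_access_config(access, psecurity=False):
--     """
--     access - словарь access-портов,
--     для которых необходимо сгенерировать конфигурацию, вида:
--         { 'FastEthernet0/12':10,
--           'FastEthernet0/14':11,
--           'FastEthernet0/16':17 }
-- psecurity - контролирует нужна ли настройка Port Security. По умолчанию значение False
--         - если значение True, то настройка выполняется с добавлением шаблона port_security
--         - если значение False, то настройка не выполняется
-- Функция возвращает словарь:
--     - ключи: имена интерфейсов, вида 'FastEthernet0/1'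
--     - значения: список команд, который надо выполнить на этом интерфейсе
--     """
--
--     access_template = ['switchport mode access',
--                            'switchport access vlan',
--                            'switchport nonegotiate',
--                            'spanning-tree portfast',
--                            'spanning-tree bpduguard enable']
--     port_security = ['switchport port-security maximum 2',
--                          'switchport port-security violation restrict',
--                          'switchport port-security']
--
--     access_config = {}
--
--     for intf in access:
--         access_config[intf] = []
--         for command in access_template:
--             if command.endswith('access vlan'):
--                 access_config[intf].append('{} {}'.format(command, access[intf]))
--             else:
--                 access_config[intf].append(command)
--         if psecurity:
--             access_config[intf].extend(port_security)
--     return access_config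
-- ===== SOURCE B (Python) =====
-- PORT_SECURITY = ['switchport port-security maximum 2',
--                  'switchport port-security violation restrict',
--                  'switchport port-security']
--
--
-- def generate_access_config(access, psecurity=False):
--     return {
--         intf: [
--             'switchport mode access',
--             f'switchport access vlan {vlan}',
--             'switchport nonegotiate',
--             'spanning-tree portfast',
--             'spanning-tree bpduguard enable',
--         ] + (PORT_SECURITY if psecurity else [])
--         for intf, vlan in access.items()
--     }
-- ===== Notes on version B (the rewrite author's own statement) =====
-- stated objective: simpler
-- what changed: Replaces the per-interface inner loop over the 5-line template with its endswith branch (and the mutated dict built key by key) by a single dict comprehension that emits each interface's command list as one literal with the VLAN interpolated in place.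
import Mathlib
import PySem

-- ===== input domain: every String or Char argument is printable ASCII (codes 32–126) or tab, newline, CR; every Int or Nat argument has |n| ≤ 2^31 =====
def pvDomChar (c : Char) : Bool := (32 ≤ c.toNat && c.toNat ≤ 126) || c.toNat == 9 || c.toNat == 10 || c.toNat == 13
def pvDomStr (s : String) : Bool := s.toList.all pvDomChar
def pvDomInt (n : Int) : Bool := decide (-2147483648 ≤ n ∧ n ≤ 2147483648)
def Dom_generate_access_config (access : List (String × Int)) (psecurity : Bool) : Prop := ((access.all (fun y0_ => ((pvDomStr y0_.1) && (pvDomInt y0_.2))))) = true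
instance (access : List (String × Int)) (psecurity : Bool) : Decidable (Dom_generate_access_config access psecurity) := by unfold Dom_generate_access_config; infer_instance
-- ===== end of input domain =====

-- B replaces A's inner template loop + endswith branch with a direct per-interface literal list (simpler decomposition); return values only.

-- ===== PORT A =====
def pvAccessTemplate : List String :=
  ["switchport mode access",
   "switchport access vlan",
   "switchport nonegotiate",
   "spanning-tree portfast",
   "spanning-tree bpduguard enable"]

-- the body of A's outer loop: access_config[intf] = []; for command in access_template: …; if psecurity: extend
def pvInnerA (psecurity : Bool) (vlan : Int) : List String :=
  let cmds := pvAccessTemplate.foldl (fun l command =>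
    if PySem.Str.endswith command "access vlan" then
      l ++ [command ++ " " ++ PySem.Int.toStr vlan]   -- '{} {}'.format(command, access[intf])
    else
      l ++ [command]) []
  if psecurity then cmds ++ ["switchport port-security maximum 2",
                             "switchport port-security violation restrict",
                             "switchport port-security"] else cmds

-- access is a Python dict (PySem.Dict built from the pairs); 'for intf in access' with
-- 'access[intf]' inside is ported as iteration over d.items.
def generate_access_config (access : List (String × Int)) (psecurity : Bool) : List (String × List String) :=
  let d := PySem.Dict.ofList access
  (d.items.foldl (fun cfg p => cfg.insert p.1 (pvInnerA psecurity p.2))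
    (PySem.Dict.empty : PySem.Dict String (List String))).items

-- ===== PORT B =====
def pvPortSecurity : List String :=
  ["switchport port-security maximum 2",
   "switchport port-security violation restrict",
   "switchport port-security"]

def generate_access_config_alt (access : List (String × Int)) (psecurity : Bool) : List (String × List String) :=
  (PySem.Dict.ofList access).items.map (fun p =>
    (p.1,
     ["switchport mode access",
      "switchport access vlan " ++ PySem.Int.toStr p.2,
      "switchport nonegotiate",
      "spanning-tree portfast",
      "spanning-tree bpduguard enable"] ++ (if psecurity then pvPortSecurity else [])))

-- ===== PRECONDITION & SPEC =====
def Spec_generate_access_config (access : List (String × Int)) (psecurity : Bool) (out : List (String × List String)) : Prop := out = generate_access_config_alt access psecurity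
instance (access : List (String × Int)) (psecurity : Bool) (out : List (String × List String)) : Decidable (Spec_generate_access_config access psecurity out) := by unfold Spec_generate_access_config; infer_instance

-- ===== CLAIM (what is proved, stated in full; the proofs are below) =====
def Claim_equal_generate_access_config : Prop := ∀ (access : List (String × Int)) (psecurity : Bool), Dom_generate_access_config access psecurity → Spec_generate_access_config access psecurity (generate_access_config access psecurity)

-- ===== LEMMAS AND PROOFS =====

-- A's inner loop over the 5-command template evaluates to B's literal list.
theorem pv_inner_eval (psecurity : Bool) (v : Int) :
    pvInnerA psecurity v
    = ["switchport mode access",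
       "switchport access vlan " ++ PySem.Int.toStr v,
       "switchport nonegotiate",
       "spanning-tree portfast",
       "spanning-tree bpduguard enable"] ++ (if psecurity then pvPortSecurity else []) := by
  have e1 : PySem.Str.endswith "switchport mode access" "access vlan" = false := by decide
  have e2 : PySem.Str.endswith "switchport access vlan" "access vlan" = true := by decide
  have e3 : PySem.Str.endswith "switchport nonegotiate" "access vlan" = false := by decide
  have e4 : PySem.Str.endswith "spanning-tree portfast" "access vlan" = false := by decide
  have e5 : PySem.Str.endswith "spanning-tree bpduguard enable" "access vlan" = false := by decide
  have h : ("switchport access vlan" ++ " " : String) = "switchport access vlan " := rfl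
  cases psecurity <;>
    simp only [pvInnerA, pvAccessTemplate, pvPortSecurity, List.foldl,
      e1, e2, e3, e4, e5, if_true, if_false, Bool.false_eq_true, ← String.append_assoc, h,
      List.nil_append, List.cons_append, List.append_nil]

-- ===== VERDICT (by name: the statement is the Claim_ definition above) =====
theorem generate_access_config_spec : Claim_equal_generate_access_config := by
  intro access psecurity _
  unfold Spec_generate_access_config generate_access_config generate_access_config_alt
  have hnd : ((PySem.Dict.ofList access (ν := Int)).items.map Prod.fst).Nodup := by
    simpa [PySem.Dict.keys] using PySem.Dict.nodup_keys_ofList (κ := String) (ν := Int) access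
  rw [PySem.Dict.items_foldl_insert_fresh (d := PySem.Dict.empty)
        (l := (PySem.Dict.ofList access).items)
        (k := fun p => p.1) (v := fun p => pvInnerA psecurity p.2)
        (by intro a _; simp [PySem.Dict.contains_empty]) hnd]
  rw [show (PySem.Dict.empty : PySem.Dict String (List String)).items = [] from rfl, List.nil_append]
  exact List.map_congr_left (fun p _ => by rw [pv_inner_eval psecurity p.2])
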